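-- pv_equiv track=rewrite | github.com/DHRUV6029/Google-Msft_InterviewQues | Google/google_build_a_brick_wall.py | generate_single_row_mask
-- ===== SOURCE A (Python) =====
-- def generate_single_row_mask(w , width , masks, bricks, cur_mask):
--     if w == width:
--         masks.append(cur_mask)
--
--     if w:
--         cur_mask = cur_mask | (1 << (w-1))  #(setting the bit that represents the crack)
--     for b in bricks:
--         if w+b <= width:
--             generate_single_row_mask(w+b, width , masks , bricks , cur_mask)
--
--     return masks
-- ===== SOURCE B (Python) =====
-- def generate_single_row_mask(w, width, masks, bricks, cur_mask):
--     # Bottom-up DP: suffix[p] = crack masks of all brick layouts from position p to width,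
--     # computed once per position instead of A's recursive DFS over the layout tree.
--     suffix = {width: [0]}
--     for p in range(width - 1, w - 1, -1):
--         bit = (1 << (p - 1)) if p > 0 else 0
--         suffix[p] = [bit | m for b in bricks if p + b <= width for m in suffix.get(p + b, [])]
--     masks += [cur_mask | m for m in suffix.get(w, [])]
--     return masks
-- ===== Notes on version B (the rewrite author's own statement) =====
-- stated objective: alternative
-- what changed: Replaced A's top-down recursive DFS over the layout tree (mutating masks at each full-width leaf) by a bottom-up dynamic program: a dict mapping each position p = width-1 .. w to the list of crack masks of all brick layouts of [p, width], built right-to-left from {width: [0]}, followed by a single lookup at w OR-ed with cur_mask.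
import Mathlib
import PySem

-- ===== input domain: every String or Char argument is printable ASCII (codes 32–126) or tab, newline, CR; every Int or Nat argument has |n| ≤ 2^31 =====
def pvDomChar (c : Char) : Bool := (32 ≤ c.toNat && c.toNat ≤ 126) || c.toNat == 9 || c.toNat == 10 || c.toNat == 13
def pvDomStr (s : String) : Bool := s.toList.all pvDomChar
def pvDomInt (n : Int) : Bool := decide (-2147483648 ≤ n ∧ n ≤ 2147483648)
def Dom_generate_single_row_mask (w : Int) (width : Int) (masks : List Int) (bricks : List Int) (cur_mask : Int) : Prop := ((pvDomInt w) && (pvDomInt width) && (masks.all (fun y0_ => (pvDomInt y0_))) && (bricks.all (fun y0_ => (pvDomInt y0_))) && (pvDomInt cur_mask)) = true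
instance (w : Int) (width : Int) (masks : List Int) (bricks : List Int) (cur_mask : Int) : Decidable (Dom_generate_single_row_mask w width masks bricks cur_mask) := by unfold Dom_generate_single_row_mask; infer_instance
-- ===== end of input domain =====

-- B replaces A's recursive DFS over the layout tree by a bottom-up dynamic program: a dict of
-- suffix crack-mask lists computed once per wall position, then one lookup; an alternative
-- decomposition with a genuinely different traversal. Both A and B mutate the Python list
-- `masks` by appending the same elements; the equivalence proved is about the returned list.


-- ===== PORT A =====
-- A is recursive; the fuel argument only totalizes the recursion (Pre_ guarantees depth
-- (width - w).toNat + 1 suffices, matching the top-level fuel exactly).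
def genAgo (fuel : Nat) (w : Int) (width : Int) (masks : List Int) (bricks : List Int) (cur_mask : Int) : List Int :=
  match fuel with
  | 0 => masks
  | f + 1 =>
    let masks1 := if w = width then masks ++ [cur_mask] else masks
    let cur := if w ≠ 0 then PySem.Int.bor cur_mask ((1 : Int) <<< (w - 1).toNat) else cur_mask
    bricks.foldl (fun acc b => if w + b ≤ width then genAgo f (w + b) width acc bricks cur else acc) masks1

def generate_single_row_mask (w : Int) (width : Int) (masks : List Int) (bricks : List Int) (cur_mask : Int) : List Int :=
  genAgo ((width - w).toNat + 1) w width masks bricks cur_mask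

-- ===== PORT B =====
-- Source B's bottom-up DP: the dict `suffix` maps each position p (from width down to w) to the
-- list of crack masks of all brick layouts filling [p, width]; then one lookup at w.
def generate_single_row_mask_alt (w : Int) (width : Int) (masks : List Int) (bricks : List Int) (cur_mask : Int) : List Int :=
  masks ++
    ((((PySem.List.pyRange (width - 1) (w - 1) (-1)).foldl
      (fun (d : PySem.Dict Int (List Int)) (p : Int) =>
        let bit : Int := if 0 < p then (1 : Int) <<< (p - 1).toNat else 0
        d.insert p (bricks.flatMap (fun b =>
          if p + b ≤ width then (d.getD (p + b) []).map (fun m => PySem.Int.bor bit m) else [])))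
      (PySem.Dict.empty.insert width [0])).getD w []).map (fun m => PySem.Int.bor cur_mask m))

-- ===== PRECONDITION & SPEC =====
-- Pre_ excludes exactly the inputs on which the Python A raises: a negative start w (negative
-- shift count, ValueError) and any brick b ≤ 0 with w + b ≤ width (infinite recursion /
-- eventual negative shift: RecursionError or ValueError).
def Pre_generate_single_row_mask (w : Int) (width : Int) (masks : List Int) (bricks : List Int) (cur_mask : Int) : Prop :=
  0 ≤ w ∧ ∀ b ∈ bricks, 0 < b ∨ width < w + b
instance (w : Int) (width : Int) (masks : List Int) (bricks : List Int) (cur_mask : Int) : Decidable (Pre_generate_single_row_mask w width masks bricks cur_mask) := by unfold Pre_generate_single_row_mask; infer_instance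

def pvWitness_generate_single_row_mask : Int × Int × List Int × List Int × Int := (0, 4, [], [1, 2], 0)

def Spec_generate_single_row_mask (w : Int) (width : Int) (masks : List Int) (bricks : List Int) (cur_mask : Int) (out : List Int) : Prop := out = generate_single_row_mask_alt w width masks bricks cur_mask
instance (w : Int) (width : Int) (masks : List Int) (bricks : List Int) (cur_mask : Int) (out : List Int) : Decidable (Spec_generate_single_row_mask w width masks bricks cur_mask out) := by unfold Spec_generate_single_row_mask; infer_instance

-- ===== CLAIM (what is proved, stated in full; the proofs are below) =====
def Claim_equal_generate_single_row_mask : Prop := ∀ (w : Int) (width : Int) (masks : List Int) (bricks : List Int) (cur_mask : Int), Dom_generate_single_row_mask w width masks bricks cur_mask → Pre_generate_single_row_mask w width masks bricks cur_mask → Spec_generate_single_row_mask w width masks bricks cur_mask (generate_single_row_mask w width masks bricks cur_mask)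

-- ===== LEMMAS AND PROOFS =====

-- ---- associativity of Python's `|` on Int (PySem.Int.bor), via its four sign cases ----
theorem pv_zero_ldiff (x : Nat) : Nat.ldiff 0 x = 0 :=
  Nat.eq_of_testBit_eq (fun k => by simp [Nat.testBit_ldiff])

theorem pv_sub_and (A : Nat) : ∀ x : Nat, A - (A &&& x) = A.ldiff x := by
  induction A using Nat.binaryRec with
  | zero => intro x; simp [pv_zero_ldiff]
  | bit b m ih =>
    intro x
    rw [← Nat.bit_bodd_div2 x, Nat.land_bit, Nat.ldiff_bit, ← ih x.div2]
    have h := Nat.and_le_left (n := m) (m := x.div2)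
    cases b <;> cases x.bodd <;> simp [Nat.bit_val] <;> omega

theorem pv_bor_nn (a b : Int) (ha : 0 ≤ a) (hb : 0 ≤ b) :
    PySem.Int.bor a b = ((a.toNat ||| b.toNat : Nat) : Int) := by
  simp [PySem.Int.bor, ha, hb]

theorem pv_bor_npos (a b : Int) (ha : 0 ≤ a) (hb : b < 0) :
    PySem.Int.bor a b = -((Nat.ldiff (-b - 1).toNat a.toNat : Nat) : Int) - 1 := by
  simp only [PySem.Int.bor, if_pos ha, if_neg (by omega : ¬ 0 ≤ b)]
  rw [pv_sub_and]

theorem pv_bor_posn (a b : Int) (ha : a < 0) (hb : 0 ≤ b) :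
    PySem.Int.bor a b = -((Nat.ldiff (-a - 1).toNat b.toNat : Nat) : Int) - 1 := by
  simp only [PySem.Int.bor, if_neg (by omega : ¬ 0 ≤ a), if_pos hb]
  rw [pv_sub_and]

theorem pv_bor_negneg (a b : Int) (ha : a < 0) (hb : b < 0) :
    PySem.Int.bor a b = -(((-a - 1).toNat &&& (-b - 1).toNat : Nat) : Int) - 1 := by
  simp only [PySem.Int.bor, if_neg (by omega : ¬ 0 ≤ a), if_neg (by omega : ¬ 0 ≤ b)]

theorem pv_bor_assoc (a b c : Int) :
    PySem.Int.bor (PySem.Int.bor a b) c = PySem.Int.bor a (PySem.Int.bor b c) := by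
  have hnn : ∀ X : Nat, (0:Int) ≤ (X : Int) := fun X => Int.natCast_nonneg X
  have hng : ∀ X : Nat, -((X:Int)) - 1 < 0 := fun X => by have := Int.natCast_nonneg X; omega
  have htn : ∀ X : Nat, ((X:Int)).toNat = X := fun X => Int.toNat_natCast X
  have hht : ∀ X : Nat, (-(-((X:Int)) - 1) - 1).toNat = X := fun X => by
    have := Int.natCast_nonneg X; omega
  by_cases ha : 0 ≤ a <;> by_cases hb : 0 ≤ b <;> by_cases hc : 0 ≤ c
  · rw [pv_bor_nn a b ha hb, pv_bor_nn b c hb hc, pv_bor_nn _ _ (hnn _) hc, pv_bor_nn a _ ha (hnn _),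
      htn, htn, Nat.lor_assoc]
  · replace hc : c < 0 := by omega
    rw [pv_bor_nn a b ha hb, pv_bor_npos b c hb hc, pv_bor_npos _ c (hnn _) hc,
      pv_bor_npos a _ ha (hng _), htn, hht]
    congr 2
    rw [Nat.cast_inj]
    refine Nat.eq_of_testBit_eq fun k => ?_
    simp only [Nat.testBit_ldiff, Nat.testBit_lor]
    cases a.toNat.testBit k <;> cases b.toNat.testBit k <;> cases (-c-1).toNat.testBit k <;> rfl
  · replace hb : b < 0 := by omega
    rw [pv_bor_npos a b ha hb, pv_bor_posn b c hb hc, pv_bor_posn _ c (hng _) hc,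
      pv_bor_npos a _ ha (hng _), hht, hht]
    congr 2
    rw [Nat.cast_inj]
    refine Nat.eq_of_testBit_eq fun k => ?_
    simp only [Nat.testBit_ldiff]
    cases a.toNat.testBit k <;> cases (-b-1).toNat.testBit k <;> cases c.toNat.testBit k <;> rfl
  · replace hb : b < 0 := by omega
    replace hc : c < 0 := by omega
    rw [pv_bor_npos a b ha hb, pv_bor_negneg b c hb hc, pv_bor_negneg _ c (hng _) hc,
      pv_bor_npos a _ ha (hng _), hht, hht]
    congr 2
    rw [Nat.cast_inj]
    refine Nat.eq_of_testBit_eq fun k => ?_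
    simp only [Nat.testBit_ldiff, Nat.testBit_land]
    cases a.toNat.testBit k <;> cases (-b-1).toNat.testBit k <;> cases (-c-1).toNat.testBit k <;> rfl
  · replace ha : a < 0 := by omega
    rw [pv_bor_posn a b ha hb, pv_bor_nn b c hb hc, pv_bor_posn _ c (hng _) hc,
      pv_bor_posn a _ ha (hnn _), hht, htn]
    congr 2
    rw [Nat.cast_inj]
    refine Nat.eq_of_testBit_eq fun k => ?_
    simp only [Nat.testBit_ldiff, Nat.testBit_lor]
    cases (-a-1).toNat.testBit k <;> cases b.toNat.testBit k <;> cases c.toNat.testBit k <;> rfl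
  · replace ha : a < 0 := by omega
    replace hc : c < 0 := by omega
    rw [pv_bor_posn a b ha hb, pv_bor_npos b c hb hc, pv_bor_negneg _ c (hng _) hc,
      pv_bor_negneg a _ ha (hng _), hht, hht]
    congr 2
    rw [Nat.cast_inj]
    refine Nat.eq_of_testBit_eq fun k => ?_
    simp only [Nat.testBit_ldiff, Nat.testBit_land]
    cases (-a-1).toNat.testBit k <;> cases b.toNat.testBit k <;> cases (-c-1).toNat.testBit k <;> rfl
  · replace ha : a < 0 := by omega
    replace hb : b < 0 := by omega
    rw [pv_bor_negneg a b ha hb, pv_bor_posn b c hb hc, pv_bor_posn _ c (hng _) hc,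
      pv_bor_negneg a _ ha (hng _), hht, hht]
    congr 2
    rw [Nat.cast_inj]
    refine Nat.eq_of_testBit_eq fun k => ?_
    simp only [Nat.testBit_ldiff, Nat.testBit_land]
    cases (-a-1).toNat.testBit k <;> cases (-b-1).toNat.testBit k <;> cases c.toNat.testBit k <;> rfl
  · replace ha : a < 0 := by omega
    replace hb : b < 0 := by omega
    replace hc : c < 0 := by omega
    rw [pv_bor_negneg a b ha hb, pv_bor_negneg b c hb hc, pv_bor_negneg _ c (hng _) hc,
      pv_bor_negneg a _ ha (hng _), hht, hht, Nat.land_assoc]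

-- ---- the common specification: gs k p = crack masks of all layouts of [p, width] (fuel k) ----
def bitv (p : Int) : Int := if 0 < p then (1 : Int) <<< (p - 1).toNat else 0

def gs (width : Int) (bricks : List Int) : Nat → Int → List Int
  | 0, p => if p = width then [0] else []
  | k + 1, p =>
    if p = width then [0]
    else bricks.flatMap (fun b =>
      if p + b ≤ width then (gs width bricks k (p + b)).map (fun m => PySem.Int.bor (bitv p) m) else [])

theorem gs_zero (width : Int) (bricks : List Int) (p : Int) :
    gs width bricks 0 p = if p = width then [0] else [] := rfl

theorem gs_unfold (width : Int) (bricks : List Int) (k : Nat) (p : Int) :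
    gs width bricks (k + 1) p
      = if p = width then [0]
        else bricks.flatMap (fun b =>
          if p + b ≤ width then (gs width bricks k (p + b)).map (fun m => PySem.Int.bor (bitv p) m) else []) := rfl

theorem pv_flatMap_congr {α β : Type} (l : List α) (f g : α → List β)
    (h : ∀ a ∈ l, f a = g a) : l.flatMap f = l.flatMap g := by
  induction l with
  | nil => rfl
  | cons x xs ih =>
    simp only [List.flatMap_cons]
    rw [h x (by simp), ih (fun a ha => h a (by simp [ha]))]

theorem gs_width (width : Int) (bricks : List Int) (k : Nat) : gs width bricks k width = [0] := by
  cases k <;> simp [gs]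

theorem gs_succ (width : Int) (bricks : List Int) (Hpos : ∀ b ∈ bricks, (1:Int) ≤ b) :
    ∀ (k : Nat) (p : Int), (width - p).toNat ≤ k →
      gs width bricks (k + 1) p = gs width bricks k p := by
  intro k
  induction k with
  | zero =>
    intro p hp
    by_cases hpw : p = width
    · simp [hpw, gs_width]
    · have hgt : width < p := by omega
      rw [gs_unfold, if_neg hpw, gs_zero, if_neg hpw, List.flatMap_eq_nil_iff.mpr]
      intro b hb
      rw [if_neg (by have := Hpos b hb; omega)]
  | succ k ih =>
    intro p hp
    by_cases hpw : p = width
    · simp [hpw, gs_width]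
    · rw [gs_unfold, gs_unfold, if_neg hpw, if_neg hpw]
      refine pv_flatMap_congr _ _ _ (fun b hb => ?_)
      by_cases hc : p + b ≤ width
      · rw [if_pos hc, if_pos hc, ih (p + b) (by have := Hpos b hb; omega)]
      · rw [if_neg hc, if_neg hc]

theorem gs_stable (width : Int) (bricks : List Int) (Hpos : ∀ b ∈ bricks, (1:Int) ≤ b)
    (p : Int) : ∀ (k k' : Nat), (width - p).toNat ≤ k → k ≤ k' →
      gs width bricks k' p = gs width bricks k p := by
  have aux : ∀ (n k : Nat), (width - p).toNat ≤ k →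
      gs width bricks (k + n) p = gs width bricks k p := by
    intro n
    induction n with
    | zero => intro k hk; rfl
    | succ n ih =>
      intro k hk
      have : k + (n + 1) = (k + n) + 1 := by omega
      rw [this, gs_succ width bricks Hpos (k + n) p (by omega), ih k hk]
  intro k k' hk hkk
  have : k' = k + (k' - k) := by omega
  rw [this, aux (k' - k) k hk]

-- ---- A's recursion computes gs ----
theorem genAgo_succ (f : Nat) (w width : Int) (masks bricks : List Int) (m : Int) :
    genAgo (f + 1) w width masks bricks m
      = bricks.foldl
          (fun acc b => if w + b ≤ width then
              genAgo f (w + b) width acc bricks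
                (if w ≠ 0 then PySem.Int.bor m ((1 : Int) <<< (w - 1).toNat) else m)
            else acc)
          (if w = width then masks ++ [m] else masks) := rfl

theorem pv_foldl_skip (G : List Int → Int → List Int) (c : Int → Prop)
    [DecidablePred c] :
    ∀ (l : List Int), (∀ b ∈ l, ¬ c b) → ∀ (init : List Int),
      l.foldl (fun acc b => if c b then G acc b else acc) init = init := by
  intro l
  induction l with
  | nil => intro _ init; rfl
  | cons b bs ih =>
    intro h init
    simp only [List.foldl_cons, if_neg (h b (by simp))]
    exact ih (fun x hx => h x (by simp [hx])) init

theorem genAgo_eq (width : Int) (bricks : List Int) (Hpos : ∀ b ∈ bricks, (1:Int) ≤ b) :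
    ∀ (k : Nat) (w : Int), 0 ≤ w → (width - w).toNat ≤ k → ∀ (masks : List Int) (m : Int),
      genAgo (k + 1) w width masks bricks m
        = masks ++ (gs width bricks k w).map (fun x => PySem.Int.bor m x) := by
  intro k
  induction k with
  | zero =>
    intro w hw hk masks m
    have hwge : width ≤ w := by omega
    rw [genAgo_succ]
    have hskip : ∀ b ∈ bricks, ¬ (w + b ≤ width) := fun b hb => by have := Hpos b hb; omega
    rw [pv_foldl_skip _ _ _ hskip]
    by_cases hww : w = width
    · simp [hww, gs_zero, PySem.Int.bor_zero]
    · simp [gs_zero, hww]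
  | succ k ih =>
    intro w hw hk masks m
    rw [genAgo_succ]
    by_cases hwge : width ≤ w
    · have hskip : ∀ b ∈ bricks, ¬ (w + b ≤ width) := fun b hb => by have := Hpos b hb; omega
      rw [pv_foldl_skip _ _ _ hskip]
      by_cases hww : w = width
      · simp [hww, gs_width, PySem.Int.bor_zero]
      · rw [gs_unfold, if_neg hww, List.flatMap_eq_nil_iff.mpr (fun b hb => by
          rw [if_neg (by have := Hpos b hb; omega)])]
        simp [hww]
    · have hww : ¬ (w = width) := by omega
      rw [if_neg hww]
      have hcur : (if w ≠ 0 then PySem.Int.bor m ((1 : Int) <<< (w - 1).toNat) else m)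
          = PySem.Int.bor m (bitv w) := by
        by_cases hw0 : w = 0
        · simp [hw0, bitv, PySem.Int.bor_zero]
        · rw [if_pos hw0, bitv, if_pos (by omega)]
      rw [hcur]
      have inner : ∀ (bs : List Int), (∀ b ∈ bs, (1:Int) ≤ b) → ∀ (init : List Int),
          bs.foldl (fun acc b => if w + b ≤ width then
              genAgo (k + 1) (w + b) width acc bricks (PySem.Int.bor m (bitv w)) else acc) init
            = init ++ bs.flatMap (fun b => if w + b ≤ width then
                (gs width bricks k (w + b)).map
                  (fun x => PySem.Int.bor (PySem.Int.bor m (bitv w)) x) else []) := by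
        intro bs
        induction bs with
        | nil => intro _ init; simp
        | cons b bs ihb =>
          intro hbs init
          simp only [List.foldl_cons, List.flatMap_cons]
          by_cases hc : w + b ≤ width
          · rw [if_pos hc, if_pos hc,
              ih (w + b) (by have := hbs b (by simp); omega)
                (by have := hbs b (by simp); omega) init (PySem.Int.bor m (bitv w)),
              ihb (fun x hx => hbs x (by simp [hx])), List.append_assoc]
          · rw [if_neg hc, if_neg hc, ihb (fun x hx => hbs x (by simp [hx])), List.nil_append]
      rw [inner bricks Hpos masks]
      congr 1
      rw [gs_unfold, if_neg hww]
      simp only [List.map_flatMap]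
      refine pv_flatMap_congr _ _ _ (fun b hb => ?_)
      by_cases hc : w + b ≤ width
      · rw [if_pos hc, if_pos hc, List.map_map]
        refine List.map_congr_left (fun x _ => ?_)
        simp only [Function.comp_apply]
        rw [pv_bor_assoc]
      · rw [if_neg hc, if_neg hc, List.map_nil]

-- ---- B's dict loop computes gs ----
theorem pv_pyRange_neg_snoc (a b : Int) (h : b < a) :
    PySem.List.pyRange a b (-1) = PySem.List.pyRange a (b + 1) (-1) ++ [b + 1] := by
  rw [PySem.List.pyRange_neg_one_eq_reverse, PySem.List.pyRange_one_cons (by omega : b + 1 < a + 1),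
    List.reverse_cons, PySem.List.pyRange_neg_one_eq_reverse]

theorem bloop (width : Int) (bricks : List Int) (Hpos : ∀ b ∈ bricks, (1:Int) ≤ b)
    (w : Int) (hw : w ≤ width) :
    ∀ (n : Nat) (q : Int), w ≤ q → q + (n : Int) = width → ∀ (p : Int),
      (((PySem.List.pyRange (width - 1) (q - 1) (-1)).foldl
        (fun (d : PySem.Dict Int (List Int)) (p : Int) =>
          let bit : Int := if 0 < p then (1 : Int) <<< (p - 1).toNat else 0
          d.insert p (bricks.flatMap (fun b =>
            if p + b ≤ width then (d.getD (p + b) []).map (fun m => PySem.Int.bor bit m) else [])))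
        (PySem.Dict.empty.insert width [0])).getD p [])
      = if q ≤ p ∧ p ≤ width then gs width bricks (width - w).toNat p else [] := by
  intro n
  induction n with
  | zero =>
    intro q hq hqn p
    have hqw : q = width := by omega
    rw [hqw, PySem.List.pyRange_neg_one_eq_nil (by omega), List.foldl_nil,
      PySem.Dict.getD_insert]
    by_cases hpw : p = width
    · rw [if_pos hpw, if_pos (by omega), hpw, gs_width]
    · rw [if_neg hpw, if_neg (by omega), PySem.Dict.getD_empty]
  | succ n ihn =>
    intro q hq hqn p
    have hqlt : q < width := by omega
    rw [pv_pyRange_neg_snoc (width - 1) (q - 1) (by omega)]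
    have hq1 : q - 1 + 1 = q := by ring
    rw [hq1, List.foldl_append, List.foldl_cons, List.foldl_nil]
    have ihq := ihn (q + 1) (by omega) (by omega)
    have hq2 : q + 1 - 1 = q := by ring
    rw [hq2] at ihq
    rw [PySem.Dict.getD_insert]
    have hval : (bricks.flatMap (fun b =>
          if q + b ≤ width then
            ((((PySem.List.pyRange (width - 1) q (-1)).foldl
              (fun (d : PySem.Dict Int (List Int)) (p : Int) =>
                let bit : Int := if 0 < p then (1 : Int) <<< (p - 1).toNat else 0
                d.insert p (bricks.flatMap (fun b =>
                  if p + b ≤ width then (d.getD (p + b) []).map (fun m => PySem.Int.bor bit m) else [])))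
              (PySem.Dict.empty.insert width [0])).getD (q + b) [])).map
              (fun m => PySem.Int.bor (if 0 < q then (1 : Int) <<< (q - 1).toNat else 0) m)
          else []))
        = gs width bricks (width - w).toNat q := by
      have hK : (width - w).toNat = ((width - w).toNat - 1) + 1 := by omega
      rw [hK, gs_unfold, if_neg (by omega : ¬ q = width)]
      refine pv_flatMap_congr _ _ _ (fun b hb => ?_)
      by_cases hc : q + b ≤ width
      · have hb1 := Hpos b hb
        rw [if_pos hc, if_pos hc]
        rw [ihq (q + b), if_pos (show q + 1 ≤ q + b ∧ q + b ≤ width from ⟨by omega, hc⟩)]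
        rw [gs_stable width bricks Hpos (q + b) ((width - w).toNat - 1) (width - w).toNat
          (by omega) (by omega)]
        rfl
      · rw [if_neg hc, if_neg hc]
    by_cases hpq : p = q
    · rw [hpq, if_pos rfl, if_pos (show q ≤ q ∧ q ≤ width from ⟨le_refl q, by omega⟩), hval]
    · rw [if_neg hpq, ihq p]
      by_cases h1 : q + 1 ≤ p ∧ p ≤ width
      · rw [if_pos h1, if_pos (show q ≤ p ∧ p ≤ width from ⟨by omega, h1.2⟩)]
      · rw [if_neg h1, if_neg (show ¬ (q ≤ p ∧ p ≤ width) from fun h => h1 ⟨by omega, h.2⟩)]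

-- ===== VERDICT (by name: the statement is the Claim_ definition above) =====
theorem generate_single_row_mask_spec : Claim_equal_generate_single_row_mask := by
  intro w width masks bricks cur_mask _ hpre
  unfold Spec_generate_single_row_mask generate_single_row_mask generate_single_row_mask_alt
  obtain ⟨hw, hb⟩ := hpre
  by_cases hwle : w ≤ width
  · have Hpos : ∀ b ∈ bricks, (1:Int) ≤ b := by
      intro b hbm
      rcases hb b hbm with h | h <;> omega
    rw [genAgo_eq width bricks Hpos (width - w).toNat w hw (le_refl _) masks cur_mask]
    rw [bloop width bricks Hpos w hwle (width - w).toNat w (le_refl _) (by omega) w]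
    rw [if_pos (by constructor <;> omega)]
  · -- width < w: both sides return masks unchanged
    have h0 : (width - w).toNat = 0 := by omega
    rw [h0, genAgo_succ]
    have hskip : ∀ b ∈ bricks, ¬ (w + b ≤ width) := by
      intro b hbm hle
      rcases hb b hbm with h | h <;> omega
    rw [pv_foldl_skip _ _ _ hskip, if_neg (by omega : ¬ w = width)]
    rw [PySem.List.pyRange_neg_one_eq_nil (by omega), List.foldl_nil,
      PySem.Dict.getD_insert, if_neg (by omega : ¬ w = width), PySem.Dict.getD_empty]
    simp
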